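-- pv_equiv track=rewrite | github.com/eriqueo/nixos-hwc | workspace_fix/utilities/nixos-translator/scanners/enhanced_container_scanner.py | categorize_by_stack
-- ===== SOURCE A (Python) =====
-- from typing import Dict, List, Optional
--
-- def categorize_by_stack(containers: List[Dict]) -> Dict[str, List[Dict]]:
--     """Organize containers into logical stacks"""
--     stacks = {
--         'downloaders': [],
--         'arr-stack': [],
--         'media-management': [],
--         'infrastructure': [],
--         'other': []
--     }
--
--     downloader_names = ['gluetun', 'qbittorrent', 'sabnzbd', 'slskd']
--     arr_names = ['sonarr', 'radarr', 'lidarr', 'prowlarr', 'bazarr', 'readarr']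
--     media_mgmt_names = ['jellyseerr', 'tdarr', 'recyclarr', 'organizr', 'soularr', 'beets']
--     infra_names = ['caddy', 'ntfy', 'frigate']
--
--     for container in containers:
--         name = container['name']
--
--         if name in downloader_names:
--             stacks['downloaders'].append(container)
--         elif name in arr_names:
--             stacks['arr-stack'].append(container)
--         elif name in media_mgmt_names:
--             stacks['media-management'].append(container)
--         elif name in infra_names:
--             stacks['infrastructure'].append(container)
--         else:
--             stacks['other'].append(container)
--
--     # Remove empty stacks
--     return {k: v for k, v in stacks.items() if v}
-- ===== SOURCE B (Python) =====
-- from typing import Dict, List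
--
-- _GROUPS = [
--     ('downloaders', ['gluetun', 'qbittorrent', 'sabnzbd', 'slskd']),
--     ('arr-stack', ['sonarr', 'radarr', 'lidarr', 'prowlarr', 'bazarr', 'readarr']),
--     ('media-management', ['jellyseerr', 'tdarr', 'recyclarr', 'organizr', 'soularr', 'beets']),
--     ('infrastructure', ['caddy', 'ntfy', 'frigate']),
-- ]
--
-- _LOOKUP = {name: stack for stack, names in _GROUPS for name in names}
--
-- _ORDER = ['downloaders', 'arr-stack', 'media-management', 'infrastructure', 'other']
--
--
-- def categorize_by_stack(containers: List[Dict]) -> Dict[str, List[Dict]]: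
--     """Organize containers into logical stacks (category-major single table lookup)."""
--     result = {}
--     for key in _ORDER:
--         group = [c for c in containers if _LOOKUP.get(c['name'], 'other') == key]
--         if group:
--             result[key] = group
--     return result
-- ===== Notes on version B (the rewrite author's own statement) =====
-- stated objective: alternative
-- what changed: Replaces A's per-container if/elif membership-chain dispatch into a mutated dict of stacks by one precomputed name-to-stack table plus a category-major pass that builds each stack as a single filtered comprehension in the fixed key order.
import Mathlib
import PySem

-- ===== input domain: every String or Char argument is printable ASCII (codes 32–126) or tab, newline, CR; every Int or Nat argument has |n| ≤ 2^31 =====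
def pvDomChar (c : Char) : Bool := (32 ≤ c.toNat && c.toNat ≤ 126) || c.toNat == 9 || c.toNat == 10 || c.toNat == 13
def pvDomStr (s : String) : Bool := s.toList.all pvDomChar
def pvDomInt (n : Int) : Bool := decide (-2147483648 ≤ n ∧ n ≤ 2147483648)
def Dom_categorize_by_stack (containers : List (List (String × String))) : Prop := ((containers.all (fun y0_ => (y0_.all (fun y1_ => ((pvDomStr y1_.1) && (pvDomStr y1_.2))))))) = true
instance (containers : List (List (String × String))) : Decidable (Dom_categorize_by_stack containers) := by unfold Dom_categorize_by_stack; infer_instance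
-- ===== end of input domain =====

-- B replaces A's per-container if/elif membership chain by one precomputed name→stack
-- table and a category-major pass (one filtered group per stack key, in the fixed key
-- order); objective: alternative (same cost, different traversal).

-- ===== PORT A =====
def pvDownloaderNames : List String := ["gluetun", "qbittorrent", "sabnzbd", "slskd"]
def pvArrNames : List String := ["sonarr", "radarr", "lidarr", "prowlarr", "bazarr", "readarr"]
def pvMediaMgmtNames : List String := ["jellyseerr", "tdarr", "recyclarr", "organizr", "soularr", "beets"]
def pvInfraNames : List String := ["caddy", "ntfy", "frigate"]

-- one loop iteration of A: look up container['name'] and append to the matching stack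
def pvStepA (stks : PySem.Dict String (List (List (String × String))))
    (container : List (String × String)) : PySem.Dict String (List (List (String × String))) :=
  match (PySem.Dict.mk container).get? "name" with
  | none => stks   -- Python raises KeyError here; such inputs are excluded by Pre_
  | some name =>
    if name ∈ pvDownloaderNames then stks.modify "downloaders" [] (· ++ [container])
    else if name ∈ pvArrNames then stks.modify "arr-stack" [] (· ++ [container])
    else if name ∈ pvMediaMgmtNames then stks.modify "media-management" [] (· ++ [container])
    else if name ∈ pvInfraNames then stks.modify "infrastructure" [] (· ++ [container])
    else stks.modify "other" [] (· ++ [container])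

def categorize_by_stack (containers : List (List (String × String))) : List (String × List (List (String × String))) :=
  let stacks0 : PySem.Dict String (List (List (String × String))) :=
    PySem.Dict.mk [("downloaders", []), ("arr-stack", []), ("media-management", []), ("infrastructure", []), ("other", [])]
  let stks := containers.foldl pvStepA stacks0
  stks.items.filter (fun kv => !kv.2.isEmpty)

-- ===== PORT B =====
def pvGroups : List (String × List String) :=
  [("downloaders", ["gluetun", "qbittorrent", "sabnzbd", "slskd"]),
   ("arr-stack", ["sonarr", "radarr", "lidarr", "prowlarr", "bazarr", "readarr"]),
   ("media-management", ["jellyseerr", "tdarr", "recyclarr", "organizr", "soularr", "beets"]),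
   ("infrastructure", ["caddy", "ntfy", "frigate"])]

def pvLookup : PySem.Dict String String :=
  pvGroups.foldl (fun d g => g.2.foldl (fun d n => d.insert n g.1) d) PySem.Dict.empty

def pvOrder : List String := ["downloaders", "arr-stack", "media-management", "infrastructure", "other"]

def pvCatOf (c : List (String × String)) : String :=
  match (PySem.Dict.mk c).get? "name" with
  | some n => pvLookup.getD n "other"
  | none => "other"   -- Python raises KeyError here; such inputs are excluded by Pre_

def categorize_by_stack_alt (containers : List (List (String × String))) : List (String × List (List (String × String))) :=
  pvOrder.foldl (fun res key =>
    let group := containers.filter (fun c => pvCatOf c == key)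
    if group.isEmpty then res else res ++ [(key, group)]) []

-- ===== PRECONDITION & SPEC =====
-- Pre_ excludes exactly the containers lacking a 'name' key, on which A (and B) raise KeyError.
def Pre_categorize_by_stack (containers : List (List (String × String))) : Prop :=
  (containers.all (fun c => ((PySem.Dict.mk c).get? "name").isSome)) = true
instance (containers : List (List (String × String))) : Decidable (Pre_categorize_by_stack containers) := by unfold Pre_categorize_by_stack; infer_instance
def pvWitness_categorize_by_stack : (List (List (String × String))) := [[("name", "sonarr")], [("name", "foo"), ("image", "x")]]

def Spec_categorize_by_stack (containers : List (List (String × String))) (out : List (String × List (List (String × String)))) : Prop := out = categorize_by_stack_alt containers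
instance (containers : List (List (String × String))) (out : List (String × List (List (String × String)))) : Decidable (Spec_categorize_by_stack containers out) := by unfold Spec_categorize_by_stack; infer_instance

-- ===== CLAIM (what is proved, stated in full; the proofs are below) =====
def Claim_equal_categorize_by_stack : Prop := ∀ (containers : List (List (String × String))), Dom_categorize_by_stack containers → Pre_categorize_by_stack containers → Spec_categorize_by_stack containers (categorize_by_stack containers)

-- ===== LEMMAS AND PROOFS =====

-- The precomputed table lookup agrees with A's membership chain, for every name.
set_option maxHeartbeats 1000000 in
theorem lookup_eq_chain (n : String) :
    pvLookup.getD n "other" =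
      (if n ∈ pvDownloaderNames then "downloaders"
       else if n ∈ pvArrNames then "arr-stack"
       else if n ∈ pvMediaMgmtNames then "media-management"
       else if n ∈ pvInfraNames then "infrastructure"
       else "other") := by
  have h : pvLookup = PySem.Dict.mk
      [("gluetun", "downloaders"), ("qbittorrent", "downloaders"), ("sabnzbd", "downloaders"), ("slskd", "downloaders"),
       ("sonarr", "arr-stack"), ("radarr", "arr-stack"), ("lidarr", "arr-stack"), ("prowlarr", "arr-stack"), ("bazarr", "arr-stack"), ("readarr", "arr-stack"),
       ("jellyseerr", "media-management"), ("tdarr", "media-management"), ("recyclarr", "media-management"), ("organizr", "media-management"), ("soularr", "media-management"), ("beets", "media-management"),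
       ("caddy", "infrastructure"), ("ntfy", "infrastructure"), ("frigate", "infrastructure")] := by
    simp [pvLookup, pvGroups, PySem.Dict.insert, PySem.Dict.empty, PySem.Dict.contains]
  rw [h]
  by_cases h1 : n ∈ pvDownloaderNames
  · rw [if_pos h1]; fin_cases h1 <;> rfl
  rw [if_neg h1]
  by_cases h2 : n ∈ pvArrNames
  · rw [if_pos h2]; fin_cases h2 <;> rfl
  rw [if_neg h2]
  by_cases h3 : n ∈ pvMediaMgmtNames
  · rw [if_pos h3]; fin_cases h3 <;> rfl
  rw [if_neg h3]
  by_cases h4 : n ∈ pvInfraNames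
  · rw [if_pos h4]; fin_cases h4 <;> rfl
  rw [if_neg h4]
  simp only [pvDownloaderNames, pvArrNames, pvMediaMgmtNames, pvInfraNames, List.mem_cons,
    List.not_mem_nil, or_false, not_or] at h1 h2 h3 h4
  clear h
  obtain ⟨a1, a2, a3, a4⟩ := h1
  obtain ⟨b1, b2, b3, b4, b5, b6⟩ := h2
  obtain ⟨c1, c2, c3, c4, c5, c6⟩ := h3
  obtain ⟨d1, d2, d3⟩ := h4
  simp only [PySem.Dict.getD, PySem.Dict.get?_mk_cons, beq_iff_eq]
  rw [if_neg (Ne.symm a1), if_neg (Ne.symm a2), if_neg (Ne.symm a3), if_neg (Ne.symm a4),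
    if_neg (Ne.symm b1), if_neg (Ne.symm b2), if_neg (Ne.symm b3), if_neg (Ne.symm b4),
    if_neg (Ne.symm b5), if_neg (Ne.symm b6), if_neg (Ne.symm c1), if_neg (Ne.symm c2),
    if_neg (Ne.symm c3), if_neg (Ne.symm c4), if_neg (Ne.symm c5), if_neg (Ne.symm c6),
    if_neg (Ne.symm d1), if_neg (Ne.symm d2), if_neg (Ne.symm d3)]
  rfl

-- A's loop, started from the five stks with arbitrary contents, computes the
-- category-major groups (appended to the starting contents).
theorem stepA_invariant (cs : List (List (String × String)))
    (h : ∀ c ∈ cs, ((PySem.Dict.mk c).get? "name").isSome = true)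
    (d a m i o : List (List (String × String))) :
    cs.foldl pvStepA (PySem.Dict.mk [("downloaders", d), ("arr-stack", a), ("media-management", m), ("infrastructure", i), ("other", o)])
      = PySem.Dict.mk
        [("downloaders", d ++ cs.filter (fun c => pvCatOf c == "downloaders")),
         ("arr-stack", a ++ cs.filter (fun c => pvCatOf c == "arr-stack")),
         ("media-management", m ++ cs.filter (fun c => pvCatOf c == "media-management")),
         ("infrastructure", i ++ cs.filter (fun c => pvCatOf c == "infrastructure")),
         ("other", o ++ cs.filter (fun c => pvCatOf c == "other"))] := by
  induction cs generalizing d a m i o with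
  | nil => simp
  | cons c cs ih =>
    obtain ⟨n, hn⟩ := Option.isSome_iff_exists.mp (h c (List.mem_cons_self))
    have hcat : pvCatOf c =
        (if n ∈ pvDownloaderNames then "downloaders"
         else if n ∈ pvArrNames then "arr-stack"
         else if n ∈ pvMediaMgmtNames then "media-management"
         else if n ∈ pvInfraNames then "infrastructure"
         else "other") := by
      simp only [pvCatOf, hn, lookup_eq_chain]
    have hstep : (c :: cs).foldl pvStepA _ = cs.foldl pvStepA (pvStepA (PySem.Dict.mk [("downloaders", d), ("arr-stack", a), ("media-management", m), ("infrastructure", i), ("other", o)]) c) := rfl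
    rw [hstep]
    have h' : ∀ x ∈ cs, ((PySem.Dict.mk x).get? "name").isSome = true := fun x hx => h x (List.mem_cons_of_mem _ hx)
    by_cases h1 : n ∈ pvDownloaderNames
    · rw [show pvStepA _ c = PySem.Dict.mk [("downloaders", d ++ [c]), ("arr-stack", a), ("media-management", m), ("infrastructure", i), ("other", o)] by
        simp only [pvStepA]; rw [hn]; simp [h1, PySem.Dict.modify, PySem.Dict.insert, PySem.Dict.getD, PySem.Dict.get?, PySem.Dict.contains]]
      rw [ih h']
      simp [hcat, h1]
    · by_cases h2 : n ∈ pvArrNames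
      · rw [show pvStepA _ c = PySem.Dict.mk [("downloaders", d), ("arr-stack", a ++ [c]), ("media-management", m), ("infrastructure", i), ("other", o)] by
          simp only [pvStepA]; rw [hn]; simp [h1, h2, PySem.Dict.modify, PySem.Dict.insert, PySem.Dict.getD, PySem.Dict.get?, PySem.Dict.contains]]
        rw [ih h']
        simp [hcat, h1, h2]
      · by_cases h3 : n ∈ pvMediaMgmtNames
        · rw [show pvStepA _ c = PySem.Dict.mk [("downloaders", d), ("arr-stack", a), ("media-management", m ++ [c]), ("infrastructure", i), ("other", o)] by
            simp only [pvStepA]; rw [hn]; simp [h1, h2, h3, PySem.Dict.modify, PySem.Dict.insert, PySem.Dict.getD, PySem.Dict.get?, PySem.Dict.contains]]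
          rw [ih h']
          simp [hcat, h1, h2, h3]
        · by_cases h4 : n ∈ pvInfraNames
          · rw [show pvStepA _ c = PySem.Dict.mk [("downloaders", d), ("arr-stack", a), ("media-management", m), ("infrastructure", i ++ [c]), ("other", o)] by
              simp only [pvStepA]; rw [hn]; simp [h1, h2, h3, h4, PySem.Dict.modify, PySem.Dict.insert, PySem.Dict.getD, PySem.Dict.get?, PySem.Dict.contains]]
            rw [ih h']
            simp [hcat, h1, h2, h3, h4]
          · rw [show pvStepA _ c = PySem.Dict.mk [("downloaders", d), ("arr-stack", a), ("media-management", m), ("infrastructure", i), ("other", o ++ [c])] by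
              simp only [pvStepA]; rw [hn]; simp [h1, h2, h3, h4, PySem.Dict.modify, PySem.Dict.insert, PySem.Dict.getD, PySem.Dict.get?, PySem.Dict.contains]]
            rw [ih h']
            simp [hcat, h1, h2, h3, h4]

-- ===== VERDICT (by name: the statement is the Claim_ definition above) =====
set_option maxHeartbeats 2000000 in
theorem categorize_by_stack_spec : Claim_equal_categorize_by_stack := by
  intro containers _ hpre
  have h : ∀ c ∈ containers, ((PySem.Dict.mk c).get? "name").isSome = true :=
    fun c hc => List.all_eq_true.mp hpre c hc
  show categorize_by_stack containers = categorize_by_stack_alt containers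
  simp only [categorize_by_stack, categorize_by_stack_alt, stepA_invariant containers h]
  simp only [pvOrder, List.foldl_cons, List.foldl_nil, List.filter_cons, List.filter_nil,
    List.nil_append]
  by_cases e1 : (containers.filter (fun c => pvCatOf c == "downloaders")).isEmpty <;>
    by_cases e2 : (containers.filter (fun c => pvCatOf c == "arr-stack")).isEmpty <;>
      by_cases e3 : (containers.filter (fun c => pvCatOf c == "media-management")).isEmpty <;>
        by_cases e4 : (containers.filter (fun c => pvCatOf c == "infrastructure")).isEmpty <;>
          by_cases e5 : (containers.filter (fun c => pvCatOf c == "other")).isEmpty <;>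
            simp [e1, e2, e3, e4, e5]
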